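-- pv_equiv track=rewrite | github.com/ichont/started | python入门100题/替换空格.py | demo
-- ===== SOURCE A (Python) =====
-- def demo(s):
--     new = ""
--     for i in s:
--         if i == " ":
--             new += "!"
--         else:
--             new += i
--     return new
-- ===== SOURCE B (Python) =====
-- def demo(s):
--     return "!".join(s.split(" "))
-- ===== Notes on version B (the rewrite author's own statement) =====
-- stated objective: idiomatic
-- what changed: Replaces the per-character scan that appends a substitute or the character to a growing string with a tokenize-then-join decomposition: split the string on the space character and reassemble the tokens with the exclamation mark as delimiter.
import Mathlib
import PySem

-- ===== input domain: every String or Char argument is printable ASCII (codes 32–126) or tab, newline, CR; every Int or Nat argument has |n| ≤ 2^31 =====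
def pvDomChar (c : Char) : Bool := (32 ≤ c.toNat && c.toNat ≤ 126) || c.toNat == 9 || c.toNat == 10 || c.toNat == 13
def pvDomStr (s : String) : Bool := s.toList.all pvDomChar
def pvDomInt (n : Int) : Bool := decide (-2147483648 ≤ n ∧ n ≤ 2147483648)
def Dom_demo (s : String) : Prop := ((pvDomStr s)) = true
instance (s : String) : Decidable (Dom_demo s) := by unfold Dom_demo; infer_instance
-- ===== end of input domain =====

-- B replaces A's per-character scan-and-append with split-on-' ' then join-with-'!' (idiomatic decomposition).

-- ===== PORT A =====
def demo (s : String) : String :=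
  String.ofList (s.toList.foldl (fun new i => if i = ' ' then new ++ ['!'] else new ++ [i]) [])

-- ===== PORT B =====
def demo_alt (s : String) : String :=
  PySem.Str.join "!" ((PySem.Str.split? s " ").getD [])

-- ===== PRECONDITION & SPEC =====
def Spec_demo (s : String) (out : String) : Prop := out = demo_alt s
instance (s : String) (out : String) : Decidable (Spec_demo s out) := by unfold Spec_demo; infer_instance

-- ===== CLAIM (what is proved, stated in full; the proofs are below) =====
def Claim_equal_demo : Prop := ∀ (s : String), Dom_demo s → Spec_demo s (demo s)

-- ===== LEMMAS AND PROOFS =====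

-- the character substitution both programs realise
def repCh (c : Char) : Char := if c = ' ' then '!' else c

-- the pieces that splitting on ' ' produces, as a plain structural recursion
def pieces : List Char → List Char → List (List Char)
  | [], cur => [cur.reverse]
  | c :: rest, cur => if c = ' ' then cur.reverse :: pieces rest [] else pieces rest (c :: cur)

lemma go_eq : ∀ (fuel : Nat) (l cur : List Char) (acc : List (List Char)), l.length < fuel →
    PySem.Chars.splitOn.go [' '] fuel l cur acc = acc.reverse ++ pieces l cur := by
  intro fuel
  induction fuel with
  | zero => intro l cur acc h; omega
  | succ n ih =>
    intro l cur acc h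
    cases l with
    | nil => simp [PySem.Chars.splitOn.go, pieces]
    | cons c rest =>
      simp only [PySem.Chars.splitOn.go]
      by_cases hc : c = ' '
      · subst hc
        have hp : [' '].isPrefixOf (' ' :: rest) = true := by simp [List.isPrefixOf]
        rw [if_pos hp]
        simp only [List.length_cons, List.drop_succ_cons, List.length_nil, List.drop_zero]
        have hlen : rest.length < n := by simp at h; omega
        rw [ih _ _ _ hlen]
        simp [pieces]
      · have hp : ¬ ([' '].isPrefixOf (c :: rest) = true) := by
          simp [List.isPrefixOf]; exact fun e => hc e.symm
        rw [if_neg hp]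
        have hlen : rest.length < n := by simp at h; omega
        rw [ih _ _ _ hlen]
        simp [pieces, hc]

lemma pieces_ne_nil (l cur : List Char) : pieces l cur ≠ [] := by
  cases l with
  | nil => simp [pieces]
  | cons c rest =>
    simp only [pieces]
    split
    · simp
    · exact pieces_ne_nil rest (c :: cur)

lemma join_pieces : ∀ (l cur : List Char),
    PySem.Chars.join ['!'] (pieces l cur) = cur.reverse ++ l.map repCh := by
  intro l
  induction l with
  | nil => intro cur; simp [pieces, PySem.Chars.join_singleton]
  | cons c rest ih =>
    intro cur
    by_cases hc : c = ' '
    · subst hc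
      simp only [pieces]
      obtain ⟨p, ps, hps⟩ := List.exists_cons_of_ne_nil (pieces_ne_nil rest [])
      rw [hps]
      simp only [if_true]
      rw [PySem.Chars.join_cons_cons, ← hps, ih]
      simp [repCh]
    · simp only [pieces, if_neg hc]
      rw [ih]
      simp [repCh, hc]

-- ===== VERDICT (by name: the statement is the Claim_ definition above) =====
theorem demo_spec : Claim_equal_demo := by
  intro s _
  unfold Spec_demo demo demo_alt
  have h1 : (fun (new : List Char) (i : Char) => if i = ' ' then new ++ ['!'] else new ++ [i])
      = fun new i => new ++ [repCh i] := by
    funext new i; by_cases hi : i = ' ' <;> simp [repCh, hi]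
  rw [h1, PySem.List.foldl_append_singleton_eq_map]
  have h2 : PySem.Str.split? s " " =
      some ((PySem.Chars.splitOn s.toList [' ']).map String.ofList) := by
    simp [PySem.Str.split?, PySem.Chars.split?]
  rw [h2]
  simp only [Option.getD_some]
  unfold PySem.Str.join
  have h3 : (List.map String.toList ((PySem.Chars.splitOn s.toList [' ']).map String.ofList))
      = PySem.Chars.splitOn s.toList [' '] := by
    rw [List.map_map]
    have : String.toList ∘ String.ofList = id := by
      funext x; simp
    rw [this, List.map_id]
  rw [h3]
  unfold PySem.Chars.splitOn
  rw [go_eq _ _ _ _ (by omega)]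
  have h4 : ("!".toList : List Char) = ['!'] := rfl
  rw [h4]
  simp only [List.reverse_nil, List.nil_append]
  rw [join_pieces]
  simp
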